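-- pv_equiv track=rewrite | github.com/accursoagus/PDI-TUIA-2025-Accurso-Barbarroja-Cena | ENTREGA - PDI-TP1-Accurso-Barbarroja-Cena.py | validar_por_cantidad
-- ===== SOURCE A (Python) =====
-- def validar_por_cantidad(conteos):
--     resultados = {}
--     for campo, n in conteos.items():
--         if "Tipo Formulario" in campo:
--             resultados[campo] = "OK"
--         elif campo == "Nombre y apellido":
--             resultados[campo] = "OK" if 2 <= n <= 25 else "MAL"
--         elif campo == "Edad":
--             resultados[campo] = "OK" if 1 <= n <= 3 else "MAL"
--         elif campo == "Mail":
--             resultados[campo] = "OK" if n <= 25 and n > 0 else "MAL"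
--         elif campo == "Legajo":
--             resultados[campo] = "OK" if n == 8 else "MAL"
--         elif "Pregunta" in campo:
--             resultados[campo] = "OK"  # Se validan aparte
--         elif campo == "Comentarios":
--             resultados[campo] = "OK" if 1 <= n <= 25 else "MAL"
--         else:
--             resultados[campo] = "OK"
--     return resultados
-- ===== SOURCE B (Python) =====
-- _REGLAS = {
--     "Nombre y apellido": (2, 25),
--     "Edad": (1, 3),
--     "Mail": (1, 25),
--     "Legajo": (8, 8),
--     "Comentarios": (1, 25),
-- }
--
-- def validar_por_cantidad(conteos):
--     # Stage 1: scan the five bounded rules against the dict and collect the failing fields.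
--     malos = {campo for campo, (lo, hi) in _REGLAS.items()
--              if campo in conteos and not lo <= conteos[campo] <= hi}
--     # Stage 2: the verdict of every field is pure membership in the failure set.
--     return {campo: "MAL" if campo in malos else "OK" for campo in conteos}
-- ===== Notes on version B (the rewrite author's own statement) =====
-- stated objective: alternative
-- what changed: A decides each field's verdict inline with a nine-way branch/substring cascade in one pass; B works in two stages with an inverted iteration: it first scans the five bounded rules against the dict to build the set of fields that fail their range, then produces every verdict by pure membership in that failure set.
import Mathlib
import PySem

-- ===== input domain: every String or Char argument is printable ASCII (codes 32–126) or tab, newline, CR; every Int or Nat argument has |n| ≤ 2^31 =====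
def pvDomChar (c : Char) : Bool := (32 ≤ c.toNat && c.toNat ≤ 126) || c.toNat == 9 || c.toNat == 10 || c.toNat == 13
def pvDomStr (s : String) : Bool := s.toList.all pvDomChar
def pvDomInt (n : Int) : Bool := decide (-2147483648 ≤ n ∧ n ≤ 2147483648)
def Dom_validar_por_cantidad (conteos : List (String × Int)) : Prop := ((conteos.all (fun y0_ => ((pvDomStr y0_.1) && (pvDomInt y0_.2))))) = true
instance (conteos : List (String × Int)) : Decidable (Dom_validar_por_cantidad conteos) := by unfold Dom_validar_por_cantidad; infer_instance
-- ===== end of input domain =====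

-- B replaces A's one-pass nine-way branch cascade by two stages: first a scan of the five
-- bounded rules against the dict collecting the set of failing fields, then a pure
-- membership pass producing the verdicts (objective: alternative decomposition).

-- ===== PORT A =====
def validar_por_cantidad (conteos : List (String × Int)) : List (String × String) :=
  (conteos.foldl (fun resultados p =>
      if PySem.Str.isIn "Tipo Formulario" p.1 then
        resultados.insert p.1 "OK"
      else if p.1 = "Nombre y apellido" then
        resultados.insert p.1 (if 2 ≤ p.2 ∧ p.2 ≤ 25 then "OK" else "MAL")
      else if p.1 = "Edad" then
        resultados.insert p.1 (if 1 ≤ p.2 ∧ p.2 ≤ 3 then "OK" else "MAL")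
      else if p.1 = "Mail" then
        resultados.insert p.1 (if p.2 ≤ 25 ∧ p.2 > 0 then "OK" else "MAL")
      else if p.1 = "Legajo" then
        resultados.insert p.1 (if p.2 = 8 then "OK" else "MAL")
      else if PySem.Str.isIn "Pregunta" p.1 then
        resultados.insert p.1 "OK"  -- Se validan aparte
      else if p.1 = "Comentarios" then
        resultados.insert p.1 (if 1 ≤ p.2 ∧ p.2 ≤ 25 then "OK" else "MAL")
      else
        resultados.insert p.1 "OK")
    PySem.Dict.empty).items

-- ===== PORT B =====
def pvReglas : List (String × (Int × Int)) :=
  [("Nombre y apellido", (2, 25)), ("Edad", (1, 3)), ("Mail", (1, 25)),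
   ("Legajo", (8, 8)), ("Comentarios", (1, 25))]

-- Stage 1 of Source B: the set comprehension collecting the bounded fields that fail their range.
def pvMalos (conteos : List (String × Int)) : PySem.Set String :=
  pvReglas.foldl (fun malos q =>
      match (PySem.Dict.ofList conteos).get? q.1 with
      | some n => if ¬(q.2.1 ≤ n ∧ n ≤ q.2.2) then malos.add q.1 else malos
      | none => malos)
    (PySem.Set.ofList [])

def validar_por_cantidad_alt (conteos : List (String × Int)) : List (String × String) :=
  let malos := pvMalos conteos
  (conteos.foldl (fun resultados p =>
      resultados.insert p.1 (if malos.contains p.1 then "MAL" else "OK"))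
    PySem.Dict.empty).items

-- ===== PRECONDITION & SPEC =====
def Spec_validar_por_cantidad (conteos : List (String × Int)) (out : List (String × String)) : Prop := out = validar_por_cantidad_alt conteos
instance (conteos : List (String × Int)) (out : List (String × String)) : Decidable (Spec_validar_por_cantidad conteos out) := by unfold Spec_validar_por_cantidad; infer_instance

-- ===== CLAIM =====
def Claim_equal_validar_por_cantidad : Prop := ∀ (conteos : List (String × Int)), Dom_validar_por_cantidad conteos → Spec_validar_por_cantidad conteos (validar_por_cantidad conteos)

-- ===== LEMMAS AND PROOFS =====

-- A's per-entry verdict, as a value (A's port writes it as a branch over insert statements).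
def pvVerdict (campo : String) (n : Int) : String :=
  if PySem.Str.isIn "Tipo Formulario" campo then "OK"
  else if campo = "Nombre y apellido" then (if 2 ≤ n ∧ n ≤ 25 then "OK" else "MAL")
  else if campo = "Edad" then (if 1 ≤ n ∧ n ≤ 3 then "OK" else "MAL")
  else if campo = "Mail" then (if n ≤ 25 ∧ n > 0 then "OK" else "MAL")
  else if campo = "Legajo" then (if n = 8 then "OK" else "MAL")
  else if PySem.Str.isIn "Pregunta" campo then "OK"
  else if campo = "Comentarios" then (if 1 ≤ n ∧ n ≤ 25 then "OK" else "MAL")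
  else "OK"

theorem pv_bodyA_eq (resultados : PySem.Dict String String) (p : String × Int) :
    (if PySem.Str.isIn "Tipo Formulario" p.1 then
       resultados.insert p.1 "OK"
     else if p.1 = "Nombre y apellido" then
       resultados.insert p.1 (if 2 ≤ p.2 ∧ p.2 ≤ 25 then "OK" else "MAL")
     else if p.1 = "Edad" then
       resultados.insert p.1 (if 1 ≤ p.2 ∧ p.2 ≤ 3 then "OK" else "MAL")
     else if p.1 = "Mail" then
       resultados.insert p.1 (if p.2 ≤ 25 ∧ p.2 > 0 then "OK" else "MAL")
     else if p.1 = "Legajo" then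
       resultados.insert p.1 (if p.2 = 8 then "OK" else "MAL")
     else if PySem.Str.isIn "Pregunta" p.1 then
       resultados.insert p.1 "OK"
     else if p.1 = "Comentarios" then
       resultados.insert p.1 (if 1 ≤ p.2 ∧ p.2 ≤ 25 then "OK" else "MAL")
     else
       resultados.insert p.1 "OK") = resultados.insert p.1 (pvVerdict p.1 p.2) := by
  unfold pvVerdict
  split_ifs <;> rfl

-- A fold of inserts whose values depend only on the pair: the lookup is decided by the
-- LAST pair of the list carrying the key.
theorem pv_get?_foldl_insert_last {ν : Type} (h : String × Int → ν) (l : List (String × Int))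
    (d : PySem.Dict String ν) (k : String) :
    (l.foldl (fun d p => d.insert p.1 (h p)) d).get? k =
      match l.reverse.find? (fun p => p.1 == k) with
      | some p => some (h p)
      | none => d.get? k := by
  induction l using List.reverseRecOn with
  | nil => simp
  | append_singleton xs p ih =>
    rw [List.foldl_append]
    simp only [List.foldl_cons, List.foldl_nil, List.reverse_append, List.reverse_singleton,
      List.singleton_append, List.find?_cons]
    rw [PySem.Dict.get?_insert]
    by_cases hk : k = p.1
    · simp [hk]
    · simp only [if_neg hk]
      have : (p.1 == k) = false := by simp [Ne.symm hk]
      rw [this]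
      exact ih

-- Membership in a fold of conditional Set.adds.
theorem pv_mem_foldl_add_if {β : Type} (C : β → Bool) (key : β → String) (l : List β)
    (s0 : PySem.Set String) (k : String) :
    k ∈ l.foldl (fun s q => if C q then s.add (key q) else s) s0 ↔
      k ∈ s0 ∨ ∃ q ∈ l, C q = true ∧ k = key q := by
  induction l generalizing s0 with
  | nil => simp
  | cons q l ih =>
    simp only [List.foldl_cons]
    rw [ih]
    by_cases hC : C q = true
    · simp only [hC, if_true, PySem.Set.mem_add, List.mem_cons]
      constructor
      · rintro (⟨hs | hq⟩ | ⟨r, hr, hCr, hk⟩)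
        · exact Or.inl hs
        · exact Or.inr ⟨q, Or.inl rfl, hC, hq⟩
        · exact Or.inr ⟨r, Or.inr hr, hCr, hk⟩
      · rintro (hs | ⟨r, (rfl | hr), hCr, hk⟩)
        · exact Or.inl (Or.inl hs)
        · exact Or.inl (Or.inr hk)
        · exact Or.inr ⟨r, hr, hCr, hk⟩
    · simp only [if_neg hC, List.mem_cons]
      constructor
      · rintro (hs | ⟨r, hr, hCr, hk⟩)
        · exact Or.inl hs
        · exact Or.inr ⟨r, Or.inr hr, hCr, hk⟩
      · rintro (hs | ⟨r, (rfl | hr), hCr, hk⟩)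
        · exact Or.inl hs
        · exact absurd hCr hC
        · exact Or.inr ⟨r, hr, hCr, hk⟩

theorem pv_mem_malos_iff (conteos : List (String × Int)) (k : String) :
    k ∈ pvMalos conteos ↔
      ∃ q ∈ pvReglas,
        (match (PySem.Dict.ofList conteos).get? q.1 with
         | some n => decide ¬(q.2.1 ≤ n ∧ n ≤ q.2.2)
         | none => false) = true ∧ k = q.1 := by
  unfold pvMalos
  have hb : (fun (malos : PySem.Set String) (q : String × (Int × Int)) =>
      match (PySem.Dict.ofList conteos).get? q.1 with
      | some n => if ¬(q.2.1 ≤ n ∧ n ≤ q.2.2) then malos.add q.1 else malos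
      | none => malos) =
      (fun malos q =>
        if (match (PySem.Dict.ofList conteos).get? q.1 with
            | some n => decide ¬(q.2.1 ≤ n ∧ n ≤ q.2.2)
            | none => false) then malos.add q.1 else malos) := by
    funext malos q
    cases hn : (PySem.Dict.ofList conteos).get? q.1 with
    | none => simp
    | some v =>
      simp only []
      split_ifs <;> first | rfl | simp_all
  rw [hb, pv_mem_foldl_add_if]
  simp

-- For a field name carrying a rule that is the unique rule with that name,
-- membership in the failure set is exactly range failure of the dict's value.
theorem pv_mem_malos_rule (conteos : List (String × Int)) (name : String) (lo hi n : Int)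
    (hrule : (name, (lo, hi)) ∈ pvReglas)
    (huniq : ∀ q ∈ pvReglas, q.1 = name → q = (name, (lo, hi)))
    (hget : (PySem.Dict.ofList conteos).get? name = some n) :
    name ∈ pvMalos conteos ↔ ¬(lo ≤ n ∧ n ≤ hi) := by
  rw [pv_mem_malos_iff]
  constructor
  · rintro ⟨q, hq, hcond, hk⟩
    have := huniq q hq hk.symm
    subst this
    rw [hget] at hcond
    simp only [decide_eq_true_eq] at hcond
    exact hcond
  · intro hr
    refine ⟨(name, (lo, hi)), hrule, ?_, rfl⟩
    rw [hget]
    simp only [decide_eq_true_eq]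
    exact hr

-- The crux: A's per-field verdict at the dict's value for that field equals
-- B's membership verdict.
theorem pv_verdict_mark (conteos : List (String × Int)) (k : String) (n : Int)
    (hget : (PySem.Dict.ofList conteos).get? k = some n) :
    pvVerdict k n = (if (pvMalos conteos).contains k then "MAL" else "OK") := by
  have hmal : ∀ x ∈ pvMalos conteos, x = "Nombre y apellido" ∨ x = "Edad" ∨ x = "Mail" ∨
      x = "Legajo" ∨ x = "Comentarios" := by
    intro x hx
    rw [pv_mem_malos_iff] at hx
    obtain ⟨q, hq, -, rfl⟩ := hx
    simp only [pvReglas, List.mem_cons, List.not_mem_nil, or_false] at hq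
    rcases hq with rfl | rfl | rfl | rfl | rfl <;> simp
  have hcont : ∀ (P : Prop) [Decidable P], (k ∈ pvMalos conteos ↔ P) →
      (if (pvMalos conteos).contains k then "MAL" else "OK") = (if P then "MAL" else "OK") := by
    intro P _ hiff
    by_cases hP : P
    · rw [if_pos hP, if_pos (by rw [PySem.Set.contains_iff]; exact hiff.mpr hP)]
    · rw [if_neg hP, if_neg (by
        intro hc
        exact hP (hiff.mp ((PySem.Set.contains_iff _ _).mp hc)))]
  by_cases h1 : k = "Nombre y apellido"
  · subst h1
    rw [hcont _ (pv_mem_malos_rule conteos _ 2 25 n (by decide) (by decide) hget)]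
    unfold pvVerdict
    rw [if_neg (by decide : ¬ PySem.Str.isIn "Tipo Formulario" "Nombre y apellido" = true), if_pos rfl]
    by_cases hr : 2 ≤ n ∧ n ≤ 25
    · rw [if_pos hr, if_neg (not_not_intro hr)]
    · rw [if_neg hr, if_pos hr]
  by_cases h2 : k = "Edad"
  · subst h2
    rw [hcont _ (pv_mem_malos_rule conteos _ 1 3 n (by decide) (by decide) hget)]
    unfold pvVerdict
    rw [if_neg (by decide : ¬ PySem.Str.isIn "Tipo Formulario" "Edad" = true), if_neg h1, if_pos rfl]
    by_cases hr : 1 ≤ n ∧ n ≤ 3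
    · rw [if_pos hr, if_neg (not_not_intro hr)]
    · rw [if_neg hr, if_pos hr]
  by_cases h3 : k = "Mail"
  · subst h3
    rw [hcont _ (pv_mem_malos_rule conteos _ 1 25 n (by decide) (by decide) hget)]
    unfold pvVerdict
    rw [if_neg (by decide : ¬ PySem.Str.isIn "Tipo Formulario" "Mail" = true), if_neg h1, if_neg h2,
      if_pos rfl]
    by_cases hr : 1 ≤ n ∧ n ≤ 25
    · rw [if_pos (by omega : n ≤ 25 ∧ n > 0), if_neg (not_not_intro hr)]
    · rw [if_neg (by omega : ¬(n ≤ 25 ∧ n > 0)), if_pos hr]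
  by_cases h4 : k = "Legajo"
  · subst h4
    rw [hcont _ (pv_mem_malos_rule conteos _ 8 8 n (by decide) (by decide) hget)]
    unfold pvVerdict
    rw [if_neg (by decide : ¬ PySem.Str.isIn "Tipo Formulario" "Legajo" = true), if_neg h1, if_neg h2,
      if_neg h3, if_pos rfl]
    by_cases hr : 8 ≤ n ∧ n ≤ 8
    · rw [if_pos (by omega : n = 8), if_neg (not_not_intro hr)]
    · rw [if_neg (by omega : ¬ n = 8), if_pos hr]
  by_cases h5 : k = "Comentarios"
  · subst h5
    rw [hcont _ (pv_mem_malos_rule conteos _ 1 25 n (by decide) (by decide) hget)]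
    unfold pvVerdict
    rw [if_neg (by decide : ¬ PySem.Str.isIn "Tipo Formulario" "Comentarios" = true), if_neg h1,
      if_neg h2, if_neg h3, if_neg h4,
      if_neg (by decide : ¬ PySem.Str.isIn "Pregunta" "Comentarios" = true), if_pos rfl]
    by_cases hr : 1 ≤ n ∧ n ≤ 25
    · rw [if_pos hr, if_neg (not_not_intro hr)]
    · rw [if_neg hr, if_pos hr]
  -- k carries no rule: both sides are "OK"
  have hnot : ¬ (pvMalos conteos).contains k = true := by
    intro hc
    rcases hmal k ((PySem.Set.contains_iff _ _).mp hc) with h | h | h | h | h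
    exacts [h1 h, h2 h, h3 h, h4 h, h5 h]
  rw [if_neg hnot]
  unfold pvVerdict
  rw [if_neg h1, if_neg h2, if_neg h3, if_neg h4, if_neg h5]
  split_ifs <;> rfl

-- ===== VERDICT =====
theorem validar_por_cantidad_spec : Claim_equal_validar_por_cantidad := by
  intro conteos _
  unfold Spec_validar_por_cantidad validar_por_cantidad validar_por_cantidad_alt
  have hA : (fun (resultados : PySem.Dict String String) (p : String × Int) =>
      if PySem.Str.isIn "Tipo Formulario" p.1 then
        resultados.insert p.1 "OK"
      else if p.1 = "Nombre y apellido" then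
        resultados.insert p.1 (if 2 ≤ p.2 ∧ p.2 ≤ 25 then "OK" else "MAL")
      else if p.1 = "Edad" then
        resultados.insert p.1 (if 1 ≤ p.2 ∧ p.2 ≤ 3 then "OK" else "MAL")
      else if p.1 = "Mail" then
        resultados.insert p.1 (if p.2 ≤ 25 ∧ p.2 > 0 then "OK" else "MAL")
      else if p.1 = "Legajo" then
        resultados.insert p.1 (if p.2 = 8 then "OK" else "MAL")
      else if PySem.Str.isIn "Pregunta" p.1 then
        resultados.insert p.1 "OK"
      else if p.1 = "Comentarios" then
        resultados.insert p.1 (if 1 ≤ p.2 ∧ p.2 ≤ 25 then "OK" else "MAL")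
      else
        resultados.insert p.1 "OK") =
      (fun resultados p => resultados.insert p.1 (pvVerdict p.1 p.2)) := by
    funext resultados p
    exact pv_bodyA_eq resultados p
  rw [hA]
  set FA := conteos.foldl (fun r p => r.insert p.1 (pvVerdict p.1 p.2)) PySem.Dict.empty with hFA
  set FB := conteos.foldl
      (fun r p => r.insert p.1 (if (pvMalos conteos).contains p.1 then "MAL" else "OK"))
      PySem.Dict.empty with hFB
  have hkA : FA.keys = PySem.Set.ofList (conteos.map Prod.fst) := by
    have := PySem.Dict.keys_foldl_insert_key conteos Prod.fst
      (fun _ p => pvVerdict p.1 p.2) PySem.Dict.empty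
    simpa only [PySem.Dict.keys_empty, PySem.Set.update_nil_left] using this
  have hkB : FB.keys = PySem.Set.ofList (conteos.map Prod.fst) := by
    have := PySem.Dict.keys_foldl_insert_key conteos Prod.fst
      (fun _ p => if (pvMalos conteos).contains p.1 then "MAL" else "OK") PySem.Dict.empty
    simpa only [PySem.Dict.keys_empty, PySem.Set.update_nil_left] using this
  have hndA : FA.keys.Nodup :=
    PySem.Dict.nodup_keys_foldl_insert_key conteos Prod.fst _ _ (by simp)
  have hndB : FB.keys.Nodup :=
    PySem.Dict.nodup_keys_foldl_insert_key conteos Prod.fst _ _ (by simp)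
  rw [PySem.Dict.items_eq_map_keys FA hndA "", PySem.Dict.items_eq_map_keys FB hndB "",
    hkA, hkB]
  apply List.map_congr_left
  intro k hk
  have hkmem : k ∈ conteos.map Prod.fst := (PySem.Set.mem_ofList _ _).mp hk
  -- the last pair of conteos with key k
  obtain ⟨q, hq⟩ : ∃ q, conteos.reverse.find? (fun p => p.1 == k) = some q := by
    cases hf : conteos.reverse.find? (fun p => p.1 == k) with
    | some q => exact ⟨q, rfl⟩
    | none =>
      obtain ⟨p, hp, hpk⟩ := List.mem_map.mp hkmem
      have := List.find?_eq_none.mp hf p (List.mem_reverse.mpr hp)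
      simp [hpk] at this
  have hq1 : q.1 = k := by
    have := List.find?_some hq
    simpa using this
  have hgA : FA.get? k = some (pvVerdict k q.2) := by
    rw [hFA, pv_get?_foldl_insert_last (fun p => pvVerdict p.1 p.2) conteos PySem.Dict.empty k,
      hq]
    show some (pvVerdict q.1 q.2) = some (pvVerdict k q.2)
    rw [hq1]
  have hgB : FB.get? k = some (if (pvMalos conteos).contains k then "MAL" else "OK") := by
    rw [hFB, pv_get?_foldl_insert_last
      (fun p => if (pvMalos conteos).contains p.1 then "MAL" else "OK") conteos PySem.Dict.empty k,
      hq]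
    show some (if (pvMalos conteos).contains q.1 then "MAL" else "OK") = _
    rw [hq1]
  have hget : (PySem.Dict.ofList conteos).get? k = some q.2 := by
    show (conteos.foldl (fun d p => d.insert p.1 p.2) PySem.Dict.empty).get? k = some q.2
    rw [pv_get?_foldl_insert_last (fun p => p.2) conteos PySem.Dict.empty k, hq]
  have hv := pv_verdict_mark conteos k q.2 hget
  have : FA.getD k "" = FB.getD k "" := by
    rw [PySem.Dict.getD_eq_get?_getD, PySem.Dict.getD_eq_get?_getD, hgA, hgB, hv]
  rw [this]
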